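-- pv_equiv track=rewrite | github.com/mysticflounder/sqlforge | sqlforge/parser.py | _collect_constraint_tokens
-- ===== SOURCE A (Python) =====
-- def _peek_at(tokens: list[str], i: int) -> str:
--     """Return the token at position i, or empty string if out of range."""
--     return tokens[i] if i < len(tokens) else ""
--
-- def _collect_constraint_tokens(tokens: list[str], i: int) -> tuple[list[str], str, int]:
--     """Collect constraint tokens until a comma or closing paren delimiter.
--
--     Returns (constraint_tokens, delimiter, new_index). Raises ValueError if ( found in constraints.
--     """
--     constraint_tokens: list[str] = []
--     while _peek_at(tokens, i) not in ("", ",", ")"):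
--         tok = tokens[i]
--         if tok == "(":
--             raise ValueError("parenthesized expression in column constraints is not supported")
--         constraint_tokens.append(tok)
--         i += 1
--     delimiter = _peek_at(tokens, i)
--     if delimiter:
--         i += 1
--     return constraint_tokens, delimiter, i
-- ===== SOURCE B (Python) =====
-- def _collect_constraint_tokens(tokens: list[str], i: int) -> tuple[list[str], str, int]:
--     """Collect constraint tokens until a comma or closing paren delimiter.
--
--     Returns (constraint_tokens, delimiter, new_index). Raises ValueError if ( found in constraints.
--     """
--     scan = tokens[i:]
--     stop = min(scan.index(d) if d in scan else len(scan) for d in ("", ",", ")"))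
--     constraint_tokens = scan[:stop]
--     if "(" in constraint_tokens:
--         raise ValueError("parenthesized expression in column constraints is not supported")
--     delimiter = scan[stop] if stop < len(scan) else ""
--     return constraint_tokens, delimiter, i + stop + 1 if delimiter else i + stop
-- ===== Notes on version B (the rewrite author's own statement) =====
-- stated objective: alternative
-- what changed: A's hand-written collect-and-check while loop is replaced by no explicit loop at all: one slice tokens[i:], the boundary found as the minimum of three built-in .index searches (for '', ',' and ')'), a slice for the collected tokens and a single membership test for the '(' validation.
-- outside the precondition, e.g. on _collect_constraint_tokens(['x'], -1): A returns (['x', 'x'], '', 1), B returns (['x'], '', 0)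
import Mathlib
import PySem

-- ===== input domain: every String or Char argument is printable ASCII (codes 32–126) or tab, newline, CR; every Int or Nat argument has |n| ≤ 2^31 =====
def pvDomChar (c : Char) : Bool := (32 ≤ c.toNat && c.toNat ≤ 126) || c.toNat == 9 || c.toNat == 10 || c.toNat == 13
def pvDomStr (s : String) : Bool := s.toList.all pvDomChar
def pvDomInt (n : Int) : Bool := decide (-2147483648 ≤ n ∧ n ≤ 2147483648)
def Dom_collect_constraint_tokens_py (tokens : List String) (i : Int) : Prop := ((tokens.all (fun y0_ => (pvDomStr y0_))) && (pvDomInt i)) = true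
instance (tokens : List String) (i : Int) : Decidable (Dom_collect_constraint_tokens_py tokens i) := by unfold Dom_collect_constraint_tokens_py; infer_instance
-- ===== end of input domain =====

-- B removes the hand-written collect-and-check loop: it slices tokens[i:], finds the boundary as
-- the minimum of three built-in index searches, slices the collected tokens and validates them with
-- one membership test (alternative decomposition, same cost; equivalence claimed for 0 ≤ i).


-- ===== PORT A =====
-- _peek_at: tokens[i] if i < len(tokens) else ""  (pyGet? = none is Python's IndexError,
-- only reachable for i < -len, which Pre_ excludes; .getD "" is a junk value there)
def pvPeekAt (tokens : List String) (i : Int) : String :=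
  if i < (tokens.length : Int) then (PySem.List.pyGet? tokens i).getD "" else ""

-- A's while loop; the fuel is a termination device only (the loop stops by i = len(tokens) at the
-- latest, so the top-level fuel is never exhausted); none = the ValueError raise on '('
def pvLoopA (tokens : List String) : Nat → Int → List String → Option (List String × Int)
  | 0, i, acc => some (acc, i)
  | f+1, i, acc =>
    let t := pvPeekAt tokens i
    if t = "" ∨ t = "," ∨ t = ")" then some (acc, i)
    else
      let tok := (PySem.List.pyGet? tokens i).getD ""
      if tok = "(" then none
      else pvLoopA tokens f (i+1) (acc ++ [tok])

def collect_constraint_tokens_py (tokens : List String) (i : Int) : List String × String × Int :=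
  match pvLoopA tokens (((tokens.length : Int) - i).toNat + 1) i [] with
  | none => ([], "", 0)   -- ValueError: excluded by Pre_
  | some (cts, i') =>
    let delimiter := pvPeekAt tokens i'
    if delimiter ≠ "" then (cts, delimiter, i' + 1) else (cts, delimiter, i')

-- ===== PORT B =====
-- scan.index(d) if d in scan else len(scan)  (the .getD 0 is unreachable: index? is some when d ∈ scan)
def pvE (scan : List String) (d : String) : Nat :=
  if scan.contains d then (PySem.List.index? scan d).getD 0 else scan.length

def collect_constraint_tokens_py_alt (tokens : List String) (i : Int) : List String × String × Int :=
  let scan := PySem.List.slice tokens (some i) none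
  let stop := min (min (pvE scan "") (pvE scan ",")) (pvE scan ")")
  let cts := scan.take stop
  if cts.contains "(" then ([], "", 0)   -- ValueError: excluded by Pre_
  else
    let delimiter := if stop < scan.length then scan.getD stop "" else ""
    if delimiter ≠ "" then (cts, delimiter, i + (stop : Int) + 1)
    else (cts, delimiter, i + (stop : Int))

-- ===== PRECONDITION & SPEC =====
def pvIsStop (s : String) : Bool := s = "" || s = "," || s = ")" || s = "("

-- Pre_ excludes (a) inputs where A raises: IndexError for i < -len(tokens), ValueError when '('
-- precedes the first delimiter reached from i; and (b) negative i — outside the parser's natural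
-- domain of forward token positions — where A's returned value arises from Python's negative-index
-- wraparound (A can revisit and double-collect tokens there), an accident of A's implementation.
def Pre_collect_constraint_tokens_py (tokens : List String) (i : Int) : Prop :=
  0 ≤ i ∧ (tokens.drop i.toNat).find? pvIsStop ≠ some "("
instance (tokens : List String) (i : Int) : Decidable (Pre_collect_constraint_tokens_py tokens i) := by unfold Pre_collect_constraint_tokens_py; infer_instance

def pvWitness_collect_constraint_tokens_py : List String × Int := (["NOT", "NULL", ","], 0)

def Spec_collect_constraint_tokens_py (tokens : List String) (i : Int) (out : List String × String × Int) : Prop := out = collect_constraint_tokens_py_alt tokens i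
instance (tokens : List String) (i : Int) (out : List String × String × Int) : Decidable (Spec_collect_constraint_tokens_py tokens i out) := by unfold Spec_collect_constraint_tokens_py; infer_instance

-- ===== CLAIM (what is proved, stated in full; the proofs are below) =====
def Claim_equal_collect_constraint_tokens_py : Prop := ∀ (tokens : List String) (i : Int), Dom_collect_constraint_tokens_py tokens i → Pre_collect_constraint_tokens_py tokens i → Spec_collect_constraint_tokens_py tokens i (collect_constraint_tokens_py tokens i)

-- ===== LEMMAS AND PROOFS =====

-- B's boundary: the minimum of the three index searches
def pvStop (l : List String) : Nat := min (min (pvE l "") (pvE l ",")) (pvE l ")")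

lemma pvE_cons (a d : String) (t : List String) :
    pvE (a :: t) d = if a = d then 0 else pvE t d + 1 := by
  by_cases h : a = d
  · subst h
    rw [pvE, PySem.List.index?_cons_self]
    simp
  · by_cases hc : t.contains d
    · have hm : d ∈ t := by simpa using hc
      obtain ⟨k, hk⟩ := Option.isSome_iff_exists.mp ((PySem.List.index?_isSome_iff t d).mpr hm)
      have hk' : List.idxOf? d t = some k := by rw [← PySem.List.index?_eq_idxOf?]; exact hk
      rw [pvE, PySem.List.index?_cons_of_ne t h, hk]
      simp [pvE, h, hm, hk']
    · have hnm : d ∉ t := by simpa using hc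
      have hnone : PySem.List.index? t d = none := by
        cases hx : PySem.List.index? t d with
        | none => rfl
        | some k => exact absurd ((PySem.List.index?_isSome_iff t d).mp (by rw [hx]; rfl)) hnm
      have h' : ¬ d = a := fun hd => h hd.symm
      rw [pvE, PySem.List.index?_cons_of_ne t h, hnone]
      simp [pvE, h, h', hnm]

lemma pvStop_nil : pvStop [] = 0 := by simp [pvStop, pvE]

lemma pvStop_cons_stop (a : String) (t : List String) (h : a = "" ∨ a = "," ∨ a = ")") :
    pvStop (a :: t) = 0 := by
  rcases h with h | h | h <;> subst h <;> simp [pvStop, pvE_cons]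

lemma pvStop_cons_go (a : String) (t : List String)
    (h1 : a ≠ "") (h2 : a ≠ ",") (h3 : a ≠ ")") :
    pvStop (a :: t) = pvStop t + 1 := by
  simp [pvStop, pvE_cons, h1, h2, h3]

lemma take_stop_no_paren (l : List String) (h : l.find? pvIsStop ≠ some "(") :
    (l.take (pvStop l)).contains "(" = false := by
  induction l with
  | nil => simp [pvStop_nil]
  | cons a t ih =>
    by_cases hs : a = "" ∨ a = "," ∨ a = ")"
    · simp [pvStop_cons_stop a t hs]
    · push Not at hs
      obtain ⟨h1, h2, h3⟩ := hs
      by_cases hp : a = "("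
      · exfalso
        apply h
        rw [List.find?_cons_of_pos (by simp [pvIsStop, hp]), hp]
      · have hfind : t.find? pvIsStop ≠ some "(" := by
          intro hf
          apply h
          rw [List.find?_cons_of_neg (by simp [pvIsStop, h1, h2, h3, hp])]
          exact hf
        rw [pvStop_cons_go a t h1 h2 h3]
        simp only [List.take_succ_cons]
        simp only [List.contains_cons, Bool.or_eq_false_iff, beq_eq_false_iff_ne, ne_eq]
        exact ⟨fun hd => hp hd.symm, by simpa using ih hfind⟩

lemma scan_cons (tokens : List String) (i : Int) (h0 : 0 ≤ i) (hlt : i < (tokens.length : Int)) :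
    tokens.drop i.toNat
      = (PySem.List.pyGet? tokens i).getD "" :: tokens.drop (i + 1).toNat := by
  have hi : i.toNat < tokens.length := by omega
  rw [PySem.List.pyGet?_eq_some_getElem tokens h0 hlt]
  rw [List.drop_eq_getElem_cons hi]
  simp [(by omega : (i+1).toNat = i.toNat + 1)]

lemma scan_nil (tokens : List String) (i : Int) (h0 : 0 ≤ i) (hge : (tokens.length : Int) ≤ i) :
    tokens.drop i.toNat = [] := by
  apply List.drop_eq_nil_of_le
  omega

-- A's loop, run with enough fuel, returns exactly the slice up to B's boundary and lands on it
lemma loop_main (tokens : List String) (f : Nat) :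
    ∀ (i : Int) (acc : List String), 0 ≤ i → (tokens.length : Int) - i < (f : Int) →
      (tokens.drop i.toNat).find? pvIsStop ≠ some "(" →
      pvLoopA tokens f i acc
        = some (acc ++ (tokens.drop i.toNat).take (pvStop (tokens.drop i.toNat)),
                i + (pvStop (tokens.drop i.toNat) : Int)) := by
  induction f with
  | zero =>
    intro i acc h0 hf _
    have : tokens.drop i.toNat = [] := scan_nil tokens i h0 (by exact_mod_cast by omega)
    rw [this, pvStop_nil]
    simp [pvLoopA]
  | succ f ih =>
    intro i acc h0 hf hfind
    by_cases hlt : i < (tokens.length : Int)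
    · have hc := scan_cons tokens i h0 hlt
      set tok := (PySem.List.pyGet? tokens i).getD "" with htok
      have hpk : pvPeekAt tokens i = tok := by simp [pvPeekAt, hlt, ← htok]
      by_cases hs : tok = "" ∨ tok = "," ∨ tok = ")"
      · rw [hc, pvStop_cons_stop tok _ hs]
        simp [pvLoopA, hpk, hs]
      · push Not at hs
        obtain ⟨h1, h2, h3⟩ := hs
        by_cases hp : tok = "("
        · exfalso
          apply hfind
          rw [hc, List.find?_cons_of_pos (by simp [pvIsStop, hp]), hp]
        · have hA : pvLoopA tokens (f+1) i acc = pvLoopA tokens f (i+1) (acc ++ [tok]) := by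
            simp [pvLoopA, hpk, ← htok, hp]
            exact fun h => absurd h (by simp [h1, h2, h3])
          have hfind' : (tokens.drop (i+1).toNat).find? pvIsStop ≠ some "(" := by
            intro hf'
            apply hfind
            rw [hc, List.find?_cons_of_neg (by simp [pvIsStop, h1, h2, h3, hp])]
            exact hf'
          rw [hA, ih (i+1) (acc ++ [tok]) (by omega) (by push_cast at hf ⊢; omega) hfind']
          rw [hc, pvStop_cons_go tok _ h1 h2 h3]
          simp only [List.take_succ_cons, List.append_assoc, List.singleton_append,
            Option.some.injEq, Prod.mk.injEq]
          exact ⟨trivial, by push_cast; ring⟩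
    · have hnil : tokens.drop i.toNat = [] := scan_nil tokens i h0 (by omega)
      have hpk : pvPeekAt tokens i = "" := by simp [pvPeekAt, hlt]
      rw [hnil, pvStop_nil]
      simp [pvLoopA, hpk]

-- _peek_at at the landing index is B's guarded lookup into the slice
lemma peek_eq (tokens : List String) (i : Int) (h0 : 0 ≤ i) (s : Nat) :
    pvPeekAt tokens (i + (s : Int))
      = (if s < (tokens.drop i.toNat).length then (tokens.drop i.toNat).getD s "" else "") := by
  by_cases h : s < (tokens.drop i.toNat).length
  · have hlen : i.toNat + s < tokens.length := by
      rw [List.length_drop] at h; omega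
    have hlt : i + (s : Int) < (tokens.length : Int) := by omega
    rw [if_pos h]
    unfold pvPeekAt
    rw [if_pos hlt, PySem.List.pyGet?_eq_some_getElem tokens (by omega) hlt]
    rw [List.getD_eq_getElem?_getD, List.getElem?_drop]
    rw [List.getElem?_eq_getElem (by omega : i.toNat + s < tokens.length)]
    simp [(by omega : (i + (s:Int)).toNat = i.toNat + s)]
  · have hge : ¬ (i + (s : Int) < (tokens.length : Int)) := by
      rw [List.length_drop] at h; omega
    rw [if_neg h]
    simp [pvPeekAt, hge]

-- ===== VERDICT (by name: the statement is the Claim_ definition above) =====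
theorem collect_constraint_tokens_py_spec : Claim_equal_collect_constraint_tokens_py := by
  intro tokens i _ hpre
  obtain ⟨h0, hfind⟩ := hpre
  unfold Spec_collect_constraint_tokens_py
  have hscan : PySem.List.slice tokens (some i) none = tokens.drop i.toNat :=
    PySem.List.slice_from tokens h0
  have hfuel : (tokens.length : Int) - i < ((((tokens.length : Int) - i).toNat + 1 : Nat) : Int) := by
    have := Int.self_le_toNat ((tokens.length : Int) - i)
    push_cast
    omega
  set scan := tokens.drop i.toNat with hsc
  have hmain := loop_main tokens ((((tokens.length : Int) - i).toNat + 1)) i [] h0 hfuel hfind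
  have hnp := take_stop_no_paren scan hfind
  rw [collect_constraint_tokens_py, hmain]
  simp only [List.nil_append]
  rw [collect_constraint_tokens_py_alt]
  simp only [hscan]
  have hps : pvStop scan = min (min (pvE scan "") (pvE scan ",")) (pvE scan ")") := rfl
  rw [← hps]
  simp only [hnp, Bool.false_eq_true, if_false]
  rw [peek_eq tokens i h0 (pvStop scan)]
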